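-- pv_equiv track=rewrite | github.com/xgkiri/CS4244-Project1 | code/test/src/utils.py | string2cnf
-- ===== SOURCE A (Python) =====
-- def string2cnf(str):
--     count = 1
--     prop = {}
--     cnf = []
--     clauses = str.split('&')
--     for clause in clauses:
--         clause = clause[1 : -1]
--         new_clause = []
--         literals = clause.split('|')
--         for literal in literals:
--             if literal[0] == '!':
--                 pos = literal[1:]
--                 if pos not in prop:
--                     prop[pos] = count
--                     new_clause.append(-1 * count)
--                     count += 1
--                 else:
--                     new_clause.append(-1 * prop[pos])
--             else:
--                 if literal not in prop:
--                     prop[literal] = count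
--                     new_clause.append(count)
--                     count += 1
--                 else:
--                     new_clause.append(prop[literal])
--         cnf.append(new_clause)
--     return cnf, prop
-- ===== SOURCE B (Python) =====
-- def string2cnf(str):
--     # Pass 1: number every proposition in first-appearance order.
--     clause_lits = [clause[1:-1].split('|') for clause in str.split('&')]
--     prop = {}
--     count = 1
--     for literal in [l for clause in clause_lits for l in clause]:
--         name = literal[1:] if literal[0] == '!' else literal
--         if name not in prop:
--             prop[name] = count
--             count += 1
--     # Pass 2: rebuild each clause by lookup in the completed table.
--     cnf = [[-prop[l[1:]] if l[0] == '!' else prop[l] for l in clause]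
--            for clause in clause_lits]
--     return cnf, prop
-- ===== Notes on version B (the rewrite author's own statement) =====
-- stated objective: alternative
-- what changed: A builds the numbering and the clause lists in one interleaved pass with an accumulator dict consulted mid-loop; B first numbers all propositions in one pass over the split literals, then rebuilds every clause by signed lookup in the completed table (two differently-shaped passes).
-- outside the precondition, e.g. on string2cnf('()'): A raises IndexError, B raises IndexError; on string2cnf('|'): A raises IndexError, B raises IndexError
import Mathlib
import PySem

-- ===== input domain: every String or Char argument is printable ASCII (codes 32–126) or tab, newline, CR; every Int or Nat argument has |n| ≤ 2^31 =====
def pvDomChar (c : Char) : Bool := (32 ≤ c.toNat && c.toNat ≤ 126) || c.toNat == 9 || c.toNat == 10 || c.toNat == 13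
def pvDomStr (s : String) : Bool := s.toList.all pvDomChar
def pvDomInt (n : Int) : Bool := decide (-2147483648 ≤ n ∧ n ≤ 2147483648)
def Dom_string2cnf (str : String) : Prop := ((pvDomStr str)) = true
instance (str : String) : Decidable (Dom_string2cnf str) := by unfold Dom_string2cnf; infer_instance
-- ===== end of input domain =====

-- B replaces A's single interleaved pass by two passes — first number the propositions, then
-- rebuild each clause by lookup in the completed table — same return value (objective: alternative).


-- ===== PORT A =====
-- s.split(sep) with the literal nonempty separators "&"/"|" never raises: split? is always `some`,
-- so `.getD []` is exact here.
def pvSplit (s sep : String) : List String := (PySem.Str.split? s sep).getD []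

-- inner loop body of A: state (count, prop, new_clause), one literal.
-- literal[0] raises IndexError on an empty literal (pyGet? = none); those inputs are outside Pre_.
def aInner (st : Int × PySem.Dict String Int × List Int) (literal : String) :
    Int × PySem.Dict String Int × List Int :=
  let (count, prop, nc) := st
  if PySem.Str.pyGet? literal 0 = some '!' then
    let pos := PySem.Str.slice literal (some 1) none
    if prop.contains pos = false then
      (count + 1, prop.insert pos count, nc ++ [-1 * count])
    else
      (count, prop, nc ++ [-1 * prop.getD pos 0])
  else
    if prop.contains literal = false then
      (count + 1, prop.insert literal count, nc ++ [count])
    else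
      (count, prop, nc ++ [prop.getD literal 0])

-- outer loop body of A: one clause string.
def aOuter (st : Int × PySem.Dict String Int × List (List Int)) (clause : String) :
    Int × PySem.Dict String Int × List (List Int) :=
  let (count, prop, cnf) := st
  let clause' := PySem.Str.slice clause (some 1) (some (-1))
  let literals := pvSplit clause' "|"
  let (count', prop', nc) := literals.foldl aInner (count, prop, [])
  (count', prop', cnf ++ [nc])

def string2cnf (str : String) : List (List Int) × (List (String × Int)) :=
  let clauses := pvSplit str "&"
  let (_, prop, cnf) := clauses.foldl aOuter (1, PySem.Dict.empty, [])
  (cnf, prop.items)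

-- ===== PORT B =====
-- the proposition name of a literal: strip a leading '!'
def bName (l : String) : String :=
  if PySem.Str.pyGet? l 0 = some '!' then PySem.Str.slice l (some 1) none else l

-- pass 1 body: assign the next number to an unseen name
def bStep (s : Int × PySem.Dict String Int) (l : String) : Int × PySem.Dict String Int :=
  if s.2.contains (bName l) then s else (s.1 + 1, s.2.insert (bName l) s.1)

-- pass 2 body: signed lookup in the completed table
def bLit (prop : PySem.Dict String Int) (l : String) : Int :=
  if PySem.Str.pyGet? l 0 = some '!' then
    -(prop.getD (PySem.Str.slice l (some 1) none) 0)
  else prop.getD l 0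

-- the clauses as literal lists (computed once, used by both passes)
def bClauseLits (str : String) : List (List String) :=
  (pvSplit str "&").map (fun clause => pvSplit (PySem.Str.slice clause (some 1) (some (-1))) "|")

def string2cnf_alt (str : String) : List (List Int) × (List (String × Int)) :=
  let lits := bClauseLits str
  let fin := (lits.flatMap id).foldl bStep (1, PySem.Dict.empty)
  (lits.map (fun c => c.map (bLit fin.2)), fin.2.items)

-- ===== PRECONDITION & SPEC =====
-- Pre_ excludes exactly the inputs on which A raises IndexError: some clause, after stripping its
-- first and last character and splitting on '|', contains an empty literal (then literal[0] raises).
def Pre_string2cnf (str : String) : Prop :=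
  ∀ c ∈ pvSplit str "&", ∀ l ∈ pvSplit (PySem.Str.slice c (some 1) (some (-1))) "|", l ≠ ""
instance (str : String) : Decidable (Pre_string2cnf str) := by unfold Pre_string2cnf; infer_instance

def pvWitness_string2cnf : String := "(a|!b)&(b|c)"

def Spec_string2cnf (str : String) (out : List (List Int) × (List (String × Int))) : Prop := out = string2cnf_alt str
instance (str : String) (out : List (List Int) × (List (String × Int))) : Decidable (Spec_string2cnf str out) := by unfold Spec_string2cnf; infer_instance

-- ===== CLAIM (what is proved, stated in full; the proofs are below) =====
def Claim_equal_string2cnf : Prop := ∀ (str : String), Dom_string2cnf str → Pre_string2cnf str → Spec_string2cnf str (string2cnf str)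

-- ===== LEMMAS AND PROOFS =====

-- dict extension: every binding of d is a binding of d'
def DExt (d d' : PySem.Dict String Int) : Prop :=
  ∀ k v, d.get? k = some v → d'.get? k = some v

theorem dext_refl (d : PySem.Dict String Int) : DExt d d := fun _ _ h => h

theorem dext_trans {d₁ d₂ d₃ : PySem.Dict String Int} (h₁ : DExt d₁ d₂) (h₂ : DExt d₂ d₃) :
    DExt d₁ d₃ := fun k v h => h₂ k v (h₁ k v h)

theorem dext_bStep (s : Int × PySem.Dict String Int) (l : String) : DExt s.2 (bStep s l).2 := by
  intro k v h
  unfold bStep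
  split
  · exact h
  · rename_i hc
    have hk : k ≠ bName l := by
      intro he; subst he
      rw [PySem.Dict.contains_eq_isSome_get?, h] at hc
      simp at hc
    simpa [PySem.Dict.get?_insert_of_ne _ _ hk] using h

theorem dext_foldl_bStep (ls : List String) (s : Int × PySem.Dict String Int) :
    DExt s.2 (ls.foldl bStep s).2 := by
  induction ls generalizing s with
  | nil => exact dext_refl _
  | cons l rest ih => exact dext_trans (dext_bStep s l) (ih (bStep s l))

-- one literal: A's step = B's pass-1 step, and the emitted int is bLit of any future dict
theorem aInner_head (count : Int) (prop : PySem.Dict String Int) (nc : List Int) (l : String)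
    (fin : PySem.Dict String Int) (hext : DExt (bStep (count, prop) l).2 fin) :
    aInner (count, prop, nc) l =
      ((bStep (count, prop) l).1, (bStep (count, prop) l).2, nc ++ [bLit fin l]) := by
  have hbe : PySem.Str.pyGet? l 0 = PySem.List.pyGet? l.toList 0 := by simp
  by_cases hb : PySem.List.pyGet? l.toList 0 = some '!'
  · by_cases hc : prop.contains (PySem.Str.slice l (some 1) none) = true
    · have hstep : bStep (count, prop) l = (count, prop) := by
        simp [bStep, bName, hb, hc]
      obtain ⟨v, hv⟩ : ∃ v, prop.get? (PySem.Str.slice l (some 1) none) = some v := by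
        rw [PySem.Dict.contains_eq_isSome_get?] at hc
        exact Option.isSome_iff_exists.mp hc
      have hfin : fin.get? (PySem.Str.slice l (some 1) none) = some v := by
        rw [hstep] at hext; exact hext _ _ hv
      simp [aInner, bLit, hb, hc, hstep,
        PySem.Dict.getD_of_get?_eq_some _ _ hv, PySem.Dict.getD_of_get?_eq_some _ _ hfin]
    · have hstep : bStep (count, prop) l =
          (count + 1, prop.insert (PySem.Str.slice l (some 1) none) count) := by
        simp [bStep, bName, hb, hc]
      have hfin : fin.get? (PySem.Str.slice l (some 1) none) = some count := by
        rw [hstep] at hext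
        exact hext _ _ (PySem.Dict.get?_insert_self _ _ _)
      simp [aInner, bLit, hb, hc, hstep, PySem.Dict.getD_of_get?_eq_some _ _ hfin]
  · by_cases hc : prop.contains l = true
    · have hstep : bStep (count, prop) l = (count, prop) := by
        simp [bStep, bName, hb, hc]
      obtain ⟨v, hv⟩ : ∃ v, prop.get? l = some v := by
        rw [PySem.Dict.contains_eq_isSome_get?] at hc
        exact Option.isSome_iff_exists.mp hc
      have hfin : fin.get? l = some v := by
        rw [hstep] at hext; exact hext _ _ hv
      simp [aInner, bLit, hb, hc, hstep,
        PySem.Dict.getD_of_get?_eq_some _ _ hv, PySem.Dict.getD_of_get?_eq_some _ _ hfin]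
    · have hstep : bStep (count, prop) l = (count + 1, prop.insert l count) := by
        simp [bStep, bName, hb, hc]
      have hfin : fin.get? l = some count := by
        rw [hstep] at hext
        exact hext _ _ (PySem.Dict.get?_insert_self _ _ _)
      simp [aInner, bLit, hb, hc, hstep, PySem.Dict.getD_of_get?_eq_some _ _ hfin]

-- A's inner fold over one clause = B's pass-1 fold, clause rebuilt via any future dict
theorem aInner_fold (literals : List String) (count : Int) (prop : PySem.Dict String Int)
    (nc : List Int) (fin : PySem.Dict String Int)
    (hext : DExt (literals.foldl bStep (count, prop)).2 fin) :
    literals.foldl aInner (count, prop, nc) =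
      ((literals.foldl bStep (count, prop)).1, (literals.foldl bStep (count, prop)).2,
        nc ++ literals.map (bLit fin)) := by
  induction literals generalizing count prop nc with
  | nil => simp
  | cons l rest ih =>
    have hext1 : DExt (bStep (count, prop) l).2 fin :=
      dext_trans (dext_foldl_bStep rest (bStep (count, prop) l)) (by simpa using hext)
    have hhead := aInner_head count prop nc l fin hext1
    simp only [List.foldl_cons, hhead]
    have := ih (bStep (count, prop) l).1 (bStep (count, prop) l).2 (nc ++ [bLit fin l])
      (by simpa using hext)
    simp only [Prod.mk.eta] at this
    rw [this]
    simp

-- A's outer fold = B's pass-1 fold over the flattened literals + pass-2 clause rebuilding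
theorem aOuter_fold (clauses : List String) (count : Int) (prop : PySem.Dict String Int)
    (cnf : List (List Int)) (fin : PySem.Dict String Int)
    (hext : DExt (((clauses.map (fun clause =>
        pvSplit (PySem.Str.slice clause (some 1) (some (-1))) "|")).flatMap id).foldl bStep
        (count, prop)).2 fin) :
    clauses.foldl aOuter (count, prop, cnf) =
      ((((clauses.map (fun clause =>
          pvSplit (PySem.Str.slice clause (some 1) (some (-1))) "|")).flatMap id).foldl bStep
          (count, prop)).1,
       (((clauses.map (fun clause =>
          pvSplit (PySem.Str.slice clause (some 1) (some (-1))) "|")).flatMap id).foldl bStep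
          (count, prop)).2,
       cnf ++ (clauses.map (fun clause =>
          pvSplit (PySem.Str.slice clause (some 1) (some (-1))) "|")).map
            (fun c => c.map (bLit fin))) := by
  induction clauses generalizing count prop cnf with
  | nil => simp
  | cons c rest ih =>
    simp only [List.map_cons, List.flatMap_cons, List.foldl_append, id] at hext ⊢
    have hlits := aInner_fold (pvSplit (PySem.Str.slice c (some 1) (some (-1))) "|")
      count prop [] fin
      (dext_trans (dext_foldl_bStep _ _) hext)
    have houter : aOuter (count, prop, cnf) c =
        (((pvSplit (PySem.Str.slice c (some 1) (some (-1))) "|").foldl bStep (count, prop)).1,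
         ((pvSplit (PySem.Str.slice c (some 1) (some (-1))) "|").foldl bStep (count, prop)).2,
         cnf ++ [(pvSplit (PySem.Str.slice c (some 1) (some (-1))) "|").map (bLit fin)]) := by
      simp only [aOuter, hlits]
      simp
    simp only [List.foldl_cons, houter]
    have := ih (((pvSplit (PySem.Str.slice c (some 1) (some (-1))) "|").foldl bStep
        (count, prop)).1)
      (((pvSplit (PySem.Str.slice c (some 1) (some (-1))) "|").foldl bStep (count, prop)).2)
      (cnf ++ [(pvSplit (PySem.Str.slice c (some 1) (some (-1))) "|").map (bLit fin)])
      (by simpa using hext)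
    simp only [Prod.mk.eta] at this
    rw [this]
    simp

-- ===== VERDICT (by name: the statement is the Claim_ definition above) =====
theorem string2cnf_spec : Claim_equal_string2cnf := by
  intro str _ _
  unfold Spec_string2cnf string2cnf string2cnf_alt bClauseLits
  have h := aOuter_fold (pvSplit str "&") 1 PySem.Dict.empty []
    (((((pvSplit str "&").map (fun clause =>
        pvSplit (PySem.Str.slice clause (some 1) (some (-1))) "|")).flatMap id).foldl bStep
        (1, PySem.Dict.empty)).2)
    (dext_refl _)
  simp only [h]
  simp
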